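-- pv_equiv track=rewrite | github.com/danielgonzagat/act | patches/v36_base/learn.py | _union_sum_tables
-- ===== SOURCE A (Python) =====
-- from typing import Any, Dict, List, Literal, Optional, Sequence, Tuple
--
-- def _union_sum_tables(
--     a: Dict[str, Dict[str, int]], b: Dict[str, Dict[str, int]]
-- ) -> Dict[str, Dict[str, int]]:
--     out: Dict[str, Dict[str, int]] = {}
--     for k, nxt in a.items():
--         out[k] = {t: int(c) for t, c in nxt.items()}
--     for k, nxt in b.items():
--         dst = out.get(k)
--         if dst is None:
--             out[k] = {t: int(c) for t, c in nxt.items()}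
--             continue
--         for t, c in nxt.items():
--             dst[t] = int(dst.get(t, 0)) + int(c)
--     return out
-- ===== SOURCE B (Python) =====
-- def _union_sum_tables(a, b):
--     # Flatten both tables into one flat counter keyed by (key, term) composite
--     # pairs, then regroup the flat counter back into the nested shape.
--     flat = {}
--     for table in (a, b):
--         for k, nxt in table.items():
--             for t, c in nxt.items():
--                 flat[(k, t)] = flat.get((k, t), 0) + int(c)
--     out = {}
--     for k in a:
--         out[k] = {}
--     for k in b:
--         out.setdefault(k, {})
--     for (k, t), v in flat.items():
--         out[k][t] = v
--     return out
-- ===== Notes on version B (the rewrite author's own statement) =====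
-- stated objective: alternative
-- what changed: Replaces A's nested-dict copy-then-update merge with a flat counter keyed by (key, term) composite tuples built in one triple-nested pass over both tables, followed by a regrouping pass that rebuilds the nested dict-of-dicts from the flat counter's insertion order.
import Mathlib
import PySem

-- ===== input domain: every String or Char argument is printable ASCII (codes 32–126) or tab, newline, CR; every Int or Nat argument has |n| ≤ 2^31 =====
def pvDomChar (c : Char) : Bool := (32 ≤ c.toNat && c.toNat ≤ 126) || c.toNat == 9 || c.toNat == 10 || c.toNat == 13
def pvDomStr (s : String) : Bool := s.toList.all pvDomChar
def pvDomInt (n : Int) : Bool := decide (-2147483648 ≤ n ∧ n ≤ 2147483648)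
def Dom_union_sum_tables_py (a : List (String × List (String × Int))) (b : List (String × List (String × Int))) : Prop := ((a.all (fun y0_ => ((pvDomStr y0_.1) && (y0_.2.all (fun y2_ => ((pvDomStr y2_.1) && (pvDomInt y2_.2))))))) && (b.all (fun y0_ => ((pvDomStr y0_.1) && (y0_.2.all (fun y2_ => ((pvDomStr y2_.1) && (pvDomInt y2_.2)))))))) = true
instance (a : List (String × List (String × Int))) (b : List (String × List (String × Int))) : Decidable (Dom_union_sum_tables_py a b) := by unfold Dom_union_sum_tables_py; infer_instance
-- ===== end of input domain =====

-- B replaces A's nested-dict copy-then-update merge by a flat counter keyed by (key, term)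
-- composite tuples, rebuilt into the nested shape by a regrouping pass (objective: alternative).


-- ===== PORT A =====
-- int(c) on an int is the identity, so the int() calls disappear in the port.
def union_sum_tables_py (a : List (String × List (String × Int))) (b : List (String × List (String × Int))) : List (String × List (String × Int)) :=
  -- out: Dict[str, Dict[str, int]] = {}; for k, nxt in a.items(): out[k] = {t: int(c) for t, c in nxt.items()}
  let out : PySem.Dict String (PySem.Dict String Int) :=
    a.foldl (fun out p => out.insert p.1 (PySem.Dict.ofList p.2)) PySem.Dict.empty
  -- for k, nxt in b.items(): dst = out.get(k); if dst is None: out[k] = {…}; continue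
  --                          for t, c in nxt.items(): dst[t] = int(dst.get(t, 0)) + int(c)
  let out := b.foldl (fun out p =>
      match out.get? p.1 with
      | none => out.insert p.1 (PySem.Dict.ofList p.2)
      | some dst => out.insert p.1 (p.2.foldl (fun dst q => dst.insert q.1 (dst.getD q.1 0 + q.2)) dst)) out
  out.items.map (fun p => (p.1, p.2.items))

-- ===== PORT B =====
def union_sum_tables_py_alt (a : List (String × List (String × Int))) (b : List (String × List (String × Int))) : List (String × List (String × Int)) :=
  -- flat = {}; for table in (a, b): for k, nxt in table.items(): for t, c in nxt.items():
  --     flat[(k, t)] = flat.get((k, t), 0) + int(c)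
  let flat : PySem.Dict (String × String) Int :=
    [a, b].foldl (fun flat table =>
      table.foldl (fun flat p =>
        p.2.foldl (fun flat q =>
          flat.insert (p.1, q.1) (flat.getD (p.1, q.1) 0 + q.2)) flat) flat)
      PySem.Dict.empty
  -- out = {}; for k in a: out[k] = {}; for k in b: out.setdefault(k, {})
  let out : PySem.Dict String (PySem.Dict String Int) :=
    a.foldl (fun out p => out.insert p.1 PySem.Dict.empty) PySem.Dict.empty
  let out := b.foldl (fun out p => out.setdefault p.1 PySem.Dict.empty) out
  -- for (k, t), v in flat.items(): out[k][t] = v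
  -- (k is always a key of out here — every flat key's first component is a top-level key of
  --  a or b, all seeded above — so the total 'modify' is exact for Python's out[k][t] = v)
  let out := flat.items.foldl (fun out q =>
      out.modify q.1.1 PySem.Dict.empty (fun dd => dd.insert q.1.2 q.2)) out
  out.items.map (fun p => (p.1, p.2.items))

-- ===== PRECONDITION & SPEC =====
-- Pre_ excludes association lists with a duplicate top-level or inner key: a Python dict can
-- never hold duplicate keys, so such lists encode no input the Python function ever receives.
def Pre_union_sum_tables_py (a : List (String × List (String × Int))) (b : List (String × List (String × Int))) : Prop :=
  (a.map Prod.fst).Nodup ∧ (b.map Prod.fst).Nodup ∧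
  (∀ p ∈ a, (p.2.map Prod.fst).Nodup) ∧ (∀ p ∈ b, (p.2.map Prod.fst).Nodup)
instance (a : List (String × List (String × Int))) (b : List (String × List (String × Int))) : Decidable (Pre_union_sum_tables_py a b) := by unfold Pre_union_sum_tables_py; infer_instance

def pvWitness_union_sum_tables_py : (List (String × List (String × Int))) × (List (String × List (String × Int))) :=
  ([("x", [("t", 1)]), ("y", [])], [("x", [("t", 2), ("u", 3)]), ("z", [("v", 4)])])

def Spec_union_sum_tables_py (a : List (String × List (String × Int))) (b : List (String × List (String × Int))) (out : List (String × List (String × Int))) : Prop := out = union_sum_tables_py_alt a b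
instance (a : List (String × List (String × Int))) (b : List (String × List (String × Int))) (out : List (String × List (String × Int))) : Decidable (Spec_union_sum_tables_py a b out) := by unfold Spec_union_sum_tables_py; infer_instance

-- ===== CLAIM (what is proved, stated in full; the proofs are below) =====
def Claim_equal_union_sum_tables_py : Prop := ∀ (a : List (String × List (String × Int))) (b : List (String × List (String × Int))), Dom_union_sum_tables_py a b → Pre_union_sum_tables_py a b → Spec_union_sum_tables_py a b (union_sum_tables_py a b)

-- ===== LEMMAS AND PROOFS =====

-- ---- shared canonical form: both programs produce, for each key of the ordered key union,
-- ---- the inner merge of a's and b's rows for that key ----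

-- the ordered union of top-level keys: a's keys, then b's new keys
def pvKeyList (a b : List (String × List (String × Int))) : List String :=
  a.map Prod.fst ++ (b.map Prod.fst).filter (fun k => !(a.map Prod.fst).contains k)

-- sum-merge of one key's two rows, and the canonical result
def pvMergeInner (av : List (String × Int)) (bv : List (String × Int)) : PySem.Dict String Int :=
  let m := av.foldl (fun m q => m.insert q.1 q.2) PySem.Dict.empty
  bv.foldl (fun m q => m.insert q.1 (m.getD q.1 0 + q.2)) m

def pvF (a b : List (String × List (String × Int))) (k : String) : PySem.Dict String Int :=
  pvMergeInner ((List.lookup k a).getD []) ((List.lookup k b).getD [])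

def pvCanon (a b : List (String × List (String × Int))) : List (String × List (String × Int)) :=
  (pvKeyList a b).map (fun k => (k, (pvF a b k).items))

-- ---- generic fold shapes ----

def pvSumFold {κ : Type} [BEq κ] (L : List (κ × Int)) (d : PySem.Dict κ Int) : PySem.Dict κ Int :=
  L.foldl (fun d q => d.insert q.1 (d.getD q.1 0 + q.2)) d

def pvInsFold {κ : Type} [BEq κ] (L : List (κ × Int)) (d : PySem.Dict κ Int) : PySem.Dict κ Int :=
  L.foldl (fun d q => d.insert q.1 q.2) d

-- the sum-insert fold over fresh pairwise-distinct keys is a plain insert fold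
theorem pvSumFold_fresh {κ : Type} [BEq κ] [LawfulBEq κ] :
    ∀ (L : List (κ × Int)) (d : PySem.Dict κ Int),
    (L.map Prod.fst).Nodup → (∀ q ∈ L, d.contains q.1 = false) →
    pvSumFold L d = pvInsFold L d := by
  intro L
  induction L with
  | nil => intro d _ _; rfl
  | cons q rest ih =>
    intro d hnd hfresh
    simp only [List.map_cons, List.nodup_cons] at hnd
    have h0 : d.getD q.1 0 = 0 := PySem.Dict.getD_of_not_contains d 0 (hfresh q (by simp))
    simp only [pvSumFold, pvInsFold, List.foldl_cons] at *
    rw [h0, zero_add]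
    exact ih _ hnd.2 (fun q' hq' => by
      have hne : q'.1 ≠ q.1 := by
        intro h; exact hnd.1 (h ▸ List.mem_map_of_mem hq')
      rw [PySem.Dict.contains_insert]
      simp [hne, hfresh q' (List.mem_cons_of_mem _ hq')])

-- the insert fold over fresh pairwise-distinct keys appends its list to the items
theorem pvInsFold_items {κ : Type} [BEq κ] [LawfulBEq κ]
    (L : List (κ × Int)) (d : PySem.Dict κ Int)
    (hnd : (L.map Prod.fst).Nodup) (hfresh : ∀ q ∈ L, d.contains q.1 = false) :
    (pvInsFold L d).items = d.items ++ L := by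
  have := PySem.Dict.items_foldl_insert_fresh L Prod.fst Prod.snd d hfresh hnd
  simpa [pvInsFold] using this

-- ---- small lookup facts ----
theorem pvLookup_none {κ ν : Type} [BEq κ] [LawfulBEq κ] (l : List (κ × ν)) (k : κ) :
    List.lookup k l = none ↔ k ∉ l.map Prod.fst := by
  rw [List.lookup_eq_none_iff]
  simp only [bne_iff_ne, ne_eq, List.mem_map, not_exists, not_and]
  constructor
  · rintro h p hp rfl
    exact h _ hp rfl
  · intro h p hp hk
    exact h p hp (hk ▸ rfl)

theorem pvLookup_mem {κ ν : Type} [BEq κ] [LawfulBEq κ] {l : List (κ × ν)} {k : κ} {v : ν}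
    (h : List.lookup k l = some v) : (k, v) ∈ l := by
  induction l with
  | nil => simp [List.lookup] at h
  | cons p rest ih =>
    by_cases hk : k = p.1
    · subst hk
      simp [List.lookup] at h
      simp [← h]
    · have hb : (k == p.1) = false := by simp [hk]
      simp [List.lookup, hb] at h
      exact List.mem_cons_of_mem _ (ih h)

-- the sum-insert fold from a Nodup dict: existing entries gain their (unique) L-value in
-- place, new entries of L are appended
theorem pvSumFold_items {κ : Type} [BEq κ] [LawfulBEq κ] [DecidableEq κ] :
    ∀ (L : List (κ × Int)) (d : PySem.Dict κ Int),
    d.keys.Nodup → (L.map Prod.fst).Nodup →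
    (pvSumFold L d).items
      = d.items.map (fun p => (p.1, p.2 + (List.lookup p.1 L).getD 0))
        ++ L.filter (fun q => !(d.contains q.1)) := by
  intro L
  induction L with
  | nil => intro d _ _; simp [pvSumFold, List.lookup]
  | cons q rest ih =>
    intro d hd hnd
    simp only [List.map_cons, List.nodup_cons] at hnd
    have hlrest : List.lookup q.1 rest = none := by
      rw [pvLookup_none]
      exact fun h => hnd.1 h
    simp only [pvSumFold, List.foldl_cons]
    by_cases hc : d.contains q.1 = true
    · set d' := d.insert q.1 (d.getD q.1 0 + q.2) with hd'
      have hdk' : d'.keys = d.keys := PySem.Dict.keys_insert_of_contains d _ hc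
      have hstep := ih d' (hdk' ▸ hd) hnd.2
      simp only [pvSumFold] at hstep
      rw [hstep]
      have hitems' : d'.items = d.items.map (fun p => if p.1 == q.1 then (q.1, d.getD q.1 0 + q.2) else p) :=
        PySem.Dict.items_insert_of_contains d _ hc
      have hfilter : rest.filter (fun r => !(d'.contains r.1)) = rest.filter (fun r => !(d.contains r.1)) := by
        apply List.filter_congr
        intro r hr
        have hne : r.1 ≠ q.1 := by
          intro h; exact hnd.1 (h ▸ List.mem_map_of_mem hr)
        rw [hd', PySem.Dict.contains_insert]
        simp [hne]
      have hfq : (q :: rest).filter (fun r => !(d.contains r.1)) = rest.filter (fun r => !(d.contains r.1)) := by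
        simp [hc]
      rw [hfilter, hfq, hitems', List.map_map]
      congr 1
      apply List.map_congr_left
      intro p hp
      by_cases hpq : p.1 = q.1
      · have hval : d.getD q.1 0 = p.2 := by
          rw [← hpq]; exact PySem.Dict.getD_of_mem_items d hp hd 0
        simp [Function.comp, hpq, List.lookup, hlrest, hval]
      · have hb : (p.1 == q.1) = false := by simp [hpq]
        simp [Function.comp, hb, List.lookup]
    · have hc' : d.contains q.1 = false := by simpa using hc
      set d' := d.insert q.1 (d.getD q.1 0 + q.2) with hd'
      have h0 : d.getD q.1 0 = 0 := PySem.Dict.getD_of_not_contains d 0 hc'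
      have hitems' : d'.items = d.items ++ [(q.1, q.2)] := by
        rw [hd', h0, zero_add]
        exact PySem.Dict.items_insert_of_not_contains d _ hc'
      have hdk' : d'.keys.Nodup := by
        have : d'.keys = d.keys ++ [q.1] := by
          simp [PySem.Dict.keys, hitems']
        rw [this]
        refine List.Nodup.append hd (by simp) ?_
        intro x hx hx2
        simp at hx2
        subst hx2
        exact absurd (by rwa [← PySem.Dict.contains_iff_mem_keys] at hx) (by simp [hc'])
      have hstep := ih d' hdk' hnd.2
      simp only [pvSumFold] at hstep
      rw [hstep, hitems']
      have hfilter : rest.filter (fun r => !(d'.contains r.1)) = rest.filter (fun r => !(d.contains r.1)) := by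
        apply List.filter_congr
        intro r hr
        have hne : r.1 ≠ q.1 := by
          intro h; exact hnd.1 (h ▸ List.mem_map_of_mem hr)
        rw [hd', PySem.Dict.contains_insert]
        simp [hne]
      have hfq : (q :: rest).filter (fun r => !(d.contains r.1)) = q :: rest.filter (fun r => !(d.contains r.1)) := by
        simp [hc']
      have hmap : d.items.map (fun p => (p.1, p.2 + (List.lookup p.1 (q :: rest)).getD 0))
          = d.items.map (fun p => (p.1, p.2 + (List.lookup p.1 rest).getD 0)) := by
        apply List.map_congr_left
        intro p hp
        have hpq : p.1 ≠ q.1 := by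
          intro h
          have : d.contains p.1 = true := by
            rw [PySem.Dict.contains_iff_mem_keys]
            exact PySem.Dict.mem_keys_of_mem_items d hp
          rw [h] at this; simp [hc'] at this
        have hb : (p.1 == q.1) = false := by simp [hpq]
        simp [List.lookup, hb]
      rw [hfilter, hfq, List.map_append, hmap]
      simp [hlrest]

-- ---- the flattened composite-key triple list and its properties ----
def pvTa (l : List (String × List (String × Int))) : List ((String × String) × Int) :=
  l.flatMap (fun p => p.2.map (fun q => ((p.1, q.1), q.2)))

theorem pvTa_mem_fst {l : List (String × List (String × Int))} {q : (String × String) × Int}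
    (h : q ∈ pvTa l) : q.1.1 ∈ l.map Prod.fst := by
  simp only [pvTa, List.mem_flatMap, List.mem_map] at h
  obtain ⟨p, hp, r, _, hr⟩ := h
  rw [← hr]
  exact List.mem_map_of_mem hp

theorem pvTa_keys_nodup {l : List (String × List (String × Int))}
    (ho : (l.map Prod.fst).Nodup) (hi : ∀ p ∈ l, (p.2.map Prod.fst).Nodup) :
    ((pvTa l).map Prod.fst).Nodup := by
  induction l with
  | nil => simp [pvTa]
  | cons p rest ih =>
    simp only [List.map_cons, List.nodup_cons] at ho
    have hrest := ih ho.2 (fun r hr => hi r (List.mem_cons_of_mem _ hr))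
    simp only [pvTa, List.flatMap_cons, List.map_append, List.map_map]
    refine List.Nodup.append ?_ hrest ?_
    · have h2 := (hi p (by simp)).map (f := fun t => (p.1, t)) (fun x y h => by simpa using h)
      simpa [List.map_map, Function.comp] using h2
    · intro x hx hx2
      simp only [List.mem_map, Function.comp] at hx
      obtain ⟨r, _, hr⟩ := hx
      simp only [List.mem_map] at hx2
      obtain ⟨s, hs, hsx⟩ := hx2
      have h1 : x.1 = p.1 := by rw [← hr]
      have h2 : x.1 ∈ rest.map Prod.fst := by
        rw [← hsx]
        exact pvTa_mem_fst hs
      rw [h1] at h2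
      exact ho.1 h2

theorem pvTa_filter_nil {l : List (String × List (String × Int))} {k : String}
    (h : k ∉ l.map Prod.fst) :
    (pvTa l).filter (fun q => q.1.1 == k) = [] := by
  rw [List.filter_eq_nil_iff]
  intro q hq
  simp only [beq_iff_eq]
  intro hk
  exact h (hk ▸ pvTa_mem_fst hq)

theorem pvTa_keys_fst {l : List (String × List (String × Int))} {kt : String × String}
    (h : kt ∈ (pvTa l).map Prod.fst) : kt.1 ∈ l.map Prod.fst := by
  obtain ⟨q, hq, rfl⟩ := List.mem_map.1 h
  exact pvTa_mem_fst hq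

theorem pvTa_filter (l : List (String × List (String × Int))) (k : String)
    (ho : (l.map Prod.fst).Nodup) :
    (pvTa l).filter (fun q => q.1.1 == k)
      = ((List.lookup k l).getD []).map (fun q => ((k, q.1), q.2)) := by
  induction l with
  | nil => simp [pvTa, List.lookup]
  | cons p rest ih =>
    simp only [List.map_cons, List.nodup_cons] at ho
    have hsplit : pvTa (p :: rest) = p.2.map (fun q => ((p.1, q.1), q.2)) ++ pvTa rest := rfl
    rw [hsplit, List.filter_append]
    by_cases hk : k = p.1
    · subst hk
      rw [pvTa_filter_nil ho.1, List.append_nil, List.filter_map]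
      simp only [List.lookup, beq_self_eq_true, Option.getD_some]
      congr 1
      apply List.filter_eq_self.2
      intro q _
      simp [Function.comp]
    · have hb : (k == p.1) = false := by simp [hk]
      have hnil : (p.2.map (fun q => ((p.1, q.1), q.2))).filter (fun q => q.1.1 == k) = [] := by
        rw [List.filter_eq_nil_iff]
        intro q hq
        obtain ⟨r, _, hr⟩ := List.mem_map.1 hq
        simp [← hr, Ne.symm hk]
      rw [hnil, List.nil_append, ih ho.2]
      simp [List.lookup, hb]

-- lookup of a composite key inside one row's block, same / different first component
theorem pvRow_lookup (k t : String) (row : List (String × Int)) :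
    List.lookup (k, t) (row.map (fun q => ((k, q.1), q.2))) = List.lookup t row := by
  induction row with
  | nil => simp [List.lookup]
  | cons r rs ih =>
    by_cases ht : t = r.1
    · subst ht; simp [List.lookup]
    · have hb1 : (t == r.1) = false := by simp [ht]
      have hb2 : (((k, t) : String × String) == (k, r.1)) = false := by
        simp [Prod.ext_iff, ht]
      simp only [List.map_cons, List.lookup, hb1, hb2]
      exact ih

theorem pvRow_lookup_ne (k t k' : String) (h : k ≠ k') (row : List (String × Int)) :
    List.lookup (k, t) (row.map (fun q => ((k', q.1), q.2))) = none := by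
  induction row with
  | nil => simp
  | cons r rs ih =>
    have hb : (((k, t) : String × String) == (k', r.1)) = false := by
      simp [Prod.ext_iff, h]
    simp only [List.map_cons, List.lookup, hb]
    exact ih

theorem pvTa_lookup (l : List (String × List (String × Int))) (k t : String)
    (ho : (l.map Prod.fst).Nodup) :
    List.lookup (k, t) (pvTa l) = List.lookup t ((List.lookup k l).getD []) := by
  induction l with
  | nil => simp [pvTa, List.lookup]
  | cons p rest ih =>
    simp only [List.map_cons, List.nodup_cons] at ho
    have hsplit : pvTa (p :: rest) = p.2.map (fun q => ((p.1, q.1), q.2)) ++ pvTa rest := rfl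
    rw [hsplit, List.lookup_append]
    by_cases hk : k = p.1
    · subst hk
      have hrest : List.lookup (p.1, t) (pvTa rest) = none := by
        rw [pvLookup_none]
        intro hmem
        exact ho.1 (pvTa_keys_fst hmem)
      rw [pvRow_lookup, hrest]
      simp [List.lookup]
    · have hb : (k == p.1) = false := by simp [hk]
      rw [pvRow_lookup_ne k t p.1 hk]
      simp only [Option.or, List.lookup, hb]
      rw [ih ho.2]

theorem pvTa_mem_keys (a : List (String × List (String × Int))) (k t : String)
    (ho : (a.map Prod.fst).Nodup) :
    (k, t) ∈ (pvTa a).map Prod.fst ↔ t ∈ (((List.lookup k a).getD []).map Prod.fst) := by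
  constructor
  · intro h
    obtain ⟨q, hq, hfst⟩ := List.mem_map.1 h
    have hq' : q ∈ (pvTa a).filter (fun r => r.1.1 == k) := by
      rw [List.mem_filter]
      refine ⟨hq, ?_⟩
      rw [hfst]
      simp
    rw [pvTa_filter a k ho] at hq'
    obtain ⟨r, hr, hrq⟩ := List.mem_map.1 hq'
    have hrt : r.1 = t := by
      rw [← hrq] at hfst
      simp only [Prod.mk.injEq] at hfst
      exact hfst.2
    exact hrt ▸ List.mem_map_of_mem hr
  · intro h
    obtain ⟨r, hr, hrt⟩ := List.mem_map.1 h
    cases hl : List.lookup k a with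
    | none => rw [hl] at hr; simp at hr
    | some av =>
      have hmem : (k, av) ∈ a := pvLookup_mem hl
      rw [hl] at hr
      have hq : ((k, r.1), r.2) ∈ pvTa a := by
        simp only [pvTa, List.mem_flatMap]
        exact ⟨(k, av), hmem, List.mem_map_of_mem hr⟩
      have := List.mem_map_of_mem (f := Prod.fst) hq
      simpa [hrt] using this

-- ---- rows and the key list ----
theorem pvRow_nodup {l : List (String × List (String × Int))}
    (hi : ∀ p ∈ l, (p.2.map Prod.fst).Nodup) (k : String) :
    (((List.lookup k l).getD []).map Prod.fst).Nodup := by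
  cases hl : List.lookup k l with
  | none => simp
  | some v => exact hi _ (pvLookup_mem hl)

theorem pvKeyList_mem (a b : List (String × List (String × Int))) (x : String) :
    x ∈ pvKeyList a b ↔ x ∈ a.map Prod.fst ∨ x ∈ b.map Prod.fst := by
  simp only [pvKeyList, List.mem_append, List.mem_filter]
  constructor
  · rintro (h | ⟨h, _⟩)
    · exact Or.inl h
    · exact Or.inr h
  · rintro (h | h)
    · exact Or.inl h
    · by_cases hx : x ∈ a.map Prod.fst
      · exact Or.inl hx
      · exact Or.inr ⟨h, by simp [hx]⟩

theorem pvKeyList_nodup {a b : List (String × List (String × Int))}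
    (ha : (a.map Prod.fst).Nodup) (hb : (b.map Prod.fst).Nodup) :
    (pvKeyList a b).Nodup := by
  refine List.Nodup.append ha (hb.filter _) ?_
  intro x hx1 hx2
  have h' : x ∉ List.map Prod.fst a := by
    have h := List.of_mem_filter hx2
    simpa using h
  exact h' hx1

-- ===================================================================
-- ==== A-side: A's nested fold produces the canonical form ====
-- ===================================================================

-- A's second loop, written with the insert outside the branch (pointwise equal to the port's step)
def pvG (out : PySem.Dict String (PySem.Dict String Int)) (p : String × List (String × Int)) : PySem.Dict String Int :=
  match out.get? p.1 with
  | none => PySem.Dict.ofList p.2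
  | some dst => p.2.foldl (fun dst q => dst.insert q.1 (dst.getD q.1 0 + q.2)) dst

def pvStepA (out : PySem.Dict String (PySem.Dict String Int)) (p : String × List (String × Int)) : PySem.Dict String (PySem.Dict String Int) :=
  out.insert p.1 (pvG out p)

theorem pvStepA_eq :
    (fun (out : PySem.Dict String (PySem.Dict String Int)) (p : String × List (String × Int)) =>
      match out.get? p.1 with
      | none => out.insert p.1 (PySem.Dict.ofList p.2)
      | some dst => out.insert p.1 (p.2.foldl (fun dst q => dst.insert q.1 (dst.getD q.1 0 + q.2)) dst))
    = pvStepA := by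
  funext out p
  cases h : out.get? p.1 <;> simp [pvStepA, pvG, h]

-- a fold that inserts f p.2 at key p.1, over pairwise-distinct keys: get? reads the lookup
theorem pvFoldlInsertGet {ν : Type} (f : List (String × Int) → ν) :
    ∀ (l : List (String × List (String × Int))) (d : PySem.Dict String ν) (k : String),
    (l.map Prod.fst).Nodup →
    (l.foldl (fun d p => d.insert p.1 (f p.2)) d).get? k =
      match List.lookup k l with
      | none => d.get? k
      | some v => some (f v) := by
  intro l
  induction l with
  | nil => intro d k _; simp [List.lookup]
  | cons p rest ih =>
    intro d k hnd
    simp only [List.map_cons, List.nodup_cons] at hnd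
    rw [List.foldl_cons, ih _ _ hnd.2]
    by_cases hk : k = p.1
    · subst hk
      have : List.lookup p.1 rest = none := (pvLookup_none rest p.1).2 hnd.1
      simp [List.lookup, this, PySem.Dict.get?_insert_self]
    · have hne : k ≠ p.1 := hk
      have hb : (k == p.1) = false := by simp [hk]
      simp [List.lookup, hb, PySem.Dict.get?_insert_of_ne _ _ hne]

-- A's second loop: get? after the b-fold
theorem pvFoldB_get (b : List (String × List (String × Int)))
    (hb : (b.map Prod.fst).Nodup) :
    ∀ (d : PySem.Dict String (PySem.Dict String Int)) (k : String),
    (b.foldl pvStepA d).get? k =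
      match List.lookup k b with
      | none => d.get? k
      | some nxt => some (pvG d (k, nxt)) := by
  induction b with
  | nil => intro d k; simp [List.lookup]
  | cons p rest ih =>
    intro d k
    simp only [List.map_cons, List.nodup_cons] at hb
    rw [List.foldl_cons, ih hb.2]
    by_cases hk : k = p.1
    · subst hk
      have : List.lookup p.1 rest = none := (pvLookup_none rest p.1).2 hb.1
      simp [List.lookup, this, pvStepA, PySem.Dict.get?_insert_self]
    · have hne : k ≠ p.1 := hk
      have hb' : (k == p.1) = false := by simp [hk]
      have hget : (pvStepA d p).get? k = d.get? k := by
        simp [pvStepA, PySem.Dict.get?_insert_of_ne _ _ hne]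
      have hpg : ∀ nxt, pvG (pvStepA d p) (k, nxt) = pvG d (k, nxt) := by
        intro nxt; simp [pvG, hget]
      simp [List.lookup, hb', hget, hpg]

-- A's per-key value is the canonical per-key merge
theorem pvPointwise (a b : List (String × List (String × Int)))
    (hpre : Pre_union_sum_tables_py a b) (k : String) :
    (b.foldl pvStepA
      (a.foldl (fun out p => out.insert p.1 (PySem.Dict.ofList p.2)) PySem.Dict.empty)).getD k PySem.Dict.empty
      = pvF a b k := by
  obtain ⟨ha, hb, hia, hib⟩ := hpre
  set out1 := a.foldl (fun out p => out.insert p.1 (PySem.Dict.ofList p.2)) PySem.Dict.empty with hout1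
  have ho1 := pvFoldlInsertGet PySem.Dict.ofList a PySem.Dict.empty k ha
  rw [PySem.Dict.get?_empty] at ho1
  rw [← hout1] at ho1
  have hg := pvFoldB_get b hb out1 k
  cases hla : List.lookup k a with
  | some va =>
    have ho1' : out1.get? k = some (PySem.Dict.ofList va) := by rw [ho1, hla]
    cases hlb : List.lookup k b with
    | some vb =>
      have hg2 : (b.foldl pvStepA out1).get? k = some (pvG out1 (k, vb)) := by rw [hg, hlb]
      have hv : pvG out1 (k, vb)
          = vb.foldl (fun dst q => dst.insert q.1 (dst.getD q.1 0 + q.2)) (PySem.Dict.ofList va) := by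
        simp [pvG, ho1']
      rw [hv] at hg2
      rw [PySem.Dict.getD_of_get?_eq_some _ _ hg2]
      rw [pvF, hla, hlb]
      rfl
    | none =>
      have hg2 : (b.foldl pvStepA out1).get? k = some (PySem.Dict.ofList va) := by
        rw [hg, hlb, ho1']
      rw [PySem.Dict.getD_of_get?_eq_some _ _ hg2]
      rw [pvF, hla, hlb]
      rfl
  | none =>
    have ho1' : out1.get? k = none := by rw [ho1, hla]
    cases hlb : List.lookup k b with
    | some vb =>
      have hg2 : (b.foldl pvStepA out1).get? k = some (pvG out1 (k, vb)) := by rw [hg, hlb]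
      have hv : pvG out1 (k, vb) = PySem.Dict.ofList vb := by simp [pvG, ho1']
      rw [hv] at hg2
      rw [PySem.Dict.getD_of_get?_eq_some _ _ hg2]
      rw [pvF, hla, hlb]
      have hnb : (vb.map Prod.fst).Nodup := hib _ (pvLookup_mem hlb)
      show PySem.Dict.ofList vb = pvMergeInner [] vb
      have hfresh := pvSumFold_fresh vb (PySem.Dict.empty (κ := String) (ν := Int)) hnb
        (fun q _ => PySem.Dict.contains_empty q.1)
      simp only [pvSumFold, pvInsFold] at hfresh
      show PySem.Dict.ofList vb
        = vb.foldl (fun m q => m.insert q.1 (m.getD q.1 0 + q.2)) (([] : List (String × Int)).foldl (fun m q => m.insert q.1 q.2) PySem.Dict.empty)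
      rw [List.foldl_nil, hfresh]
      rfl
    | none =>
      rw [pvF, hla, hlb]
      have hget : (b.foldl pvStepA out1).get? k = none := by rw [hg, hlb, ho1']
      rw [PySem.Dict.getD_of_get?_eq_none _ _ hget]
      rfl

theorem pvA_canon (a b : List (String × List (String × Int)))
    (hpre : Pre_union_sum_tables_py a b) :
    union_sum_tables_py a b = pvCanon a b := by
  obtain ⟨ha, hb, hia, hib⟩ := hpre
  unfold union_sum_tables_py pvCanon
  dsimp only
  rw [pvStepA_eq]
  have hout1items :
      (a.foldl (fun out p => out.insert p.1 (PySem.Dict.ofList p.2)) PySem.Dict.empty).items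
        = a.map (fun p => (p.1, PySem.Dict.ofList p.2)) := by
    have := PySem.Dict.items_foldl_insert_fresh a Prod.fst (fun p => PySem.Dict.ofList p.2)
      PySem.Dict.empty (fun p _ => PySem.Dict.contains_empty p.1) ha
    simpa using this
  have hout1keys :
      (a.foldl (fun out p => out.insert p.1 (PySem.Dict.ofList p.2)) PySem.Dict.empty).keys
        = a.map Prod.fst := by
    simp [PySem.Dict.keys, hout1items]
  have hout1nd :
      (a.foldl (fun out p => out.insert p.1 (PySem.Dict.ofList p.2)) PySem.Dict.empty).keys.Nodup := by
    rw [hout1keys]; exact ha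
  have h2k : (b.foldl pvStepA
      (a.foldl (fun out p => out.insert p.1 (PySem.Dict.ofList p.2)) PySem.Dict.empty)).keys
      = pvKeyList a b := by
    have e : pvStepA = fun (d : PySem.Dict String (PySem.Dict String Int)) (x : String × List (String × Int)) => d.insert x.1 (pvG d x) := rfl
    have h := PySem.Dict.keys_foldl_insert_key b Prod.fst pvG
      (a.foldl (fun out p => out.insert p.1 (PySem.Dict.ofList p.2)) PySem.Dict.empty)
    rw [hout1keys] at h
    rw [← e] at h
    rw [h, PySem.Set.update_eq_append_filter, PySem.Set.ofList_eq_self_of_nodup _ hb]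
    rfl
  have h2nd : (b.foldl pvStepA
      (a.foldl (fun out p => out.insert p.1 (PySem.Dict.ofList p.2)) PySem.Dict.empty)).keys.Nodup := by
    have e : pvStepA = fun (d : PySem.Dict String (PySem.Dict String Int)) (x : String × List (String × Int)) => d.insert x.1 (pvG d x) := rfl
    have h := PySem.Dict.nodup_keys_foldl_insert_key b Prod.fst pvG
      (a.foldl (fun out p => out.insert p.1 (PySem.Dict.ofList p.2)) PySem.Dict.empty) hout1nd
    rw [← e] at h
    exact h
  have h2items := PySem.Dict.items_eq_map_keys
    (b.foldl pvStepA
      (a.foldl (fun out p => out.insert p.1 (PySem.Dict.ofList p.2)) PySem.Dict.empty))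
    h2nd PySem.Dict.empty
  rw [h2k] at h2items
  rw [h2items, List.map_map]
  apply List.map_congr_left
  intro k _
  simp only [Function.comp]
  rw [pvPointwise a b ⟨ha, hb, hia, hib⟩ k]

-- ===================================================================
-- ==== B-side: the flat counter + regroup produces the canonical form ====
-- ===================================================================

-- one table's triple loop is the sum-fold over its flattened triples
theorem pvTableFold (table : List (String × List (String × Int)))
    (d : PySem.Dict (String × String) Int) :
    table.foldl (fun flat p =>
        p.2.foldl (fun flat q =>
          flat.insert (p.1, q.1) (flat.getD (p.1, q.1) 0 + q.2)) flat) d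
      = pvSumFold (pvTa table) d := by
  rw [pvSumFold, pvTa, List.foldl_flatMap]
  congr 1
  funext acc p
  rw [List.foldl_map]

-- the flat counter's items: a's triples with b's (unique) addend folded in, then b's new triples
theorem pvFlat_items (a b : List (String × List (String × Int)))
    (hpre : Pre_union_sum_tables_py a b) :
    (pvSumFold (pvTa b) (pvSumFold (pvTa a) PySem.Dict.empty)).items
      = (pvTa a).map (fun p => (p.1, p.2 + (List.lookup p.1 (pvTa b)).getD 0))
        ++ (pvTa b).filter (fun q => !(((pvTa a).map Prod.fst).contains q.1)) := by
  obtain ⟨ha, hb, hia, hib⟩ := hpre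
  have hndA : ((pvTa a).map Prod.fst).Nodup := pvTa_keys_nodup ha hia
  have hndB : ((pvTa b).map Prod.fst).Nodup := pvTa_keys_nodup hb hib
  have hA : pvSumFold (pvTa a) PySem.Dict.empty = pvInsFold (pvTa a) PySem.Dict.empty :=
    pvSumFold_fresh _ _ hndA (fun q _ => PySem.Dict.contains_empty q.1)
  have hAitems : (pvInsFold (pvTa a) PySem.Dict.empty).items = pvTa a := by
    have := pvInsFold_items (pvTa a) PySem.Dict.empty hndA (fun q _ => PySem.Dict.contains_empty q.1)
    simpa using this
  have hAkeys : (pvInsFold (pvTa a) PySem.Dict.empty).keys = (pvTa a).map Prod.fst := by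
    simp [PySem.Dict.keys, hAitems]
  have hAnd : (pvInsFold (pvTa a) PySem.Dict.empty).keys.Nodup := by
    rw [hAkeys]; exact hndA
  have hcont : ∀ x, (pvInsFold (pvTa a) PySem.Dict.empty).contains x = ((pvTa a).map Prod.fst).contains x := by
    intro x
    rw [PySem.Dict.contains_eq_decide_mem_keys, hAkeys]
    simp
  rw [hA, pvSumFold_items (pvTa b) _ hAnd hndB, hAitems]
  congr 1
  apply List.filter_congr
  intro q _
  rw [hcont]

-- reading one inner dict's getD through the regroup loop: only this key's triples matter
theorem pvModifyFold_getD :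
    ∀ (L : List ((String × String) × Int)) (d : PySem.Dict String (PySem.Dict String Int)) (k : String),
    ((L.foldl (fun out q => out.modify q.1.1 PySem.Dict.empty (fun dd => dd.insert q.1.2 q.2)) d).getD k PySem.Dict.empty)
      = (L.filter (fun q => q.1.1 == k)).foldl (fun dd q => dd.insert q.1.2 q.2) (d.getD k PySem.Dict.empty) := by
  intro L
  induction L with
  | nil => intro d k; simp
  | cons q rest ih =>
    intro d k
    rw [List.foldl_cons, ih]
    by_cases hk : q.1.1 = k
    · have hb : (q.1.1 == k) = true := by simp [hk]
      rw [show (q :: rest).filter (fun r => r.1.1 == k) = q :: rest.filter (fun r => r.1.1 == k) by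
        simp [hb]]
      rw [List.foldl_cons]
      congr 1
      rw [PySem.Dict.getD_modify]
      simp [hk]
    · have hb : (q.1.1 == k) = false := by simp [hk]
      rw [show (q :: rest).filter (fun r => r.1.1 == k) = rest.filter (fun r => r.1.1 == k) by
        simp [hb]]
      congr 1
      rw [PySem.Dict.getD_modify]
      simp [Ne.symm hk]

-- the seeding loops: every key of the ordered union, each bound to an empty row
theorem pvSetdefaultFold_items :
    ∀ (l : List (String × List (String × Int))) (d : PySem.Dict String (PySem.Dict String Int)),
    (l.map Prod.fst).Nodup →
    (l.foldl (fun out p => out.setdefault p.1 PySem.Dict.empty) d).items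
      = d.items ++ ((l.map Prod.fst).filter (fun k => !(d.keys.contains k))).map (fun k => (k, PySem.Dict.empty)) := by
  intro l
  induction l with
  | nil => intro d _; simp
  | cons p rest ih =>
    intro d hnd
    simp only [List.map_cons, List.nodup_cons] at hnd
    rw [List.foldl_cons]
    by_cases hc : d.contains p.1 = true
    · rw [PySem.Dict.setdefault_of_contains d _ hc, ih d hnd.2]
      have hkc : p.1 ∈ d.keys := (PySem.Dict.contains_iff_mem_keys d p.1).1 hc
      rw [show ((p :: rest).map Prod.fst).filter (fun k => !(d.keys.contains k))
          = (rest.map Prod.fst).filter (fun k => !(d.keys.contains k)) by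
        simp [hkc]]
    · have hc' : d.contains p.1 = false := by simpa using hc
      rw [PySem.Dict.setdefault_of_not_contains d _ hc']
      set d' := d.insert p.1 (PySem.Dict.empty (κ := String) (ν := Int)) with hd'
      have hitems' : d'.items = d.items ++ [(p.1, PySem.Dict.empty)] :=
        PySem.Dict.items_insert_of_not_contains d _ hc'
      have hkeys' : d'.keys = d.keys ++ [p.1] :=
        PySem.Dict.keys_insert_of_not_contains d _ hc'
      have hnd' : (rest.map Prod.fst).Nodup := hnd.2
      rw [ih d' hnd', hitems', hkeys']
      have hkc : p.1 ∉ d.keys := fun h => by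
        rw [(PySem.Dict.contains_iff_mem_keys d p.1).2 h] at hc'
        cases hc'
      have hfilter : (rest.map Prod.fst).filter (fun k => !((d.keys ++ [p.1]).contains k))
          = (rest.map Prod.fst).filter (fun k => !(d.keys.contains k)) := by
        apply List.filter_congr
        intro x hx
        have hne : x ≠ p.1 := fun h => hnd.1 (h ▸ hx)
        simp [hne]
      rw [hfilter]
      rw [show ((p :: rest).map Prod.fst).filter (fun k => !(d.keys.contains k))
          = p.1 :: (rest.map Prod.fst).filter (fun k => !(d.keys.contains k)) by
        simp [hkc]]
      simp

theorem pvSeed_items (a b : List (String × List (String × Int)))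
    (ha : (a.map Prod.fst).Nodup) (hb : (b.map Prod.fst).Nodup) :
    (b.foldl (fun out p => out.setdefault p.1 PySem.Dict.empty)
      (a.foldl (fun out p => out.insert p.1 PySem.Dict.empty)
        (PySem.Dict.empty : PySem.Dict String (PySem.Dict String Int)))).items
      = (pvKeyList a b).map (fun k => (k, PySem.Dict.empty)) := by
  have hAitems : (a.foldl (fun out p => out.insert p.1 PySem.Dict.empty)
        (PySem.Dict.empty : PySem.Dict String (PySem.Dict String Int))).items
      = (a.map Prod.fst).map (fun k => (k, PySem.Dict.empty)) := by
    have := PySem.Dict.items_foldl_insert_fresh a Prod.fst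
      (fun _ => PySem.Dict.empty (κ := String) (ν := Int)) PySem.Dict.empty
      (fun p _ => PySem.Dict.contains_empty p.1) ha
    simpa [List.map_map, Function.comp] using this
  have hAkeys : (a.foldl (fun out p => out.insert p.1 PySem.Dict.empty)
        (PySem.Dict.empty : PySem.Dict String (PySem.Dict String Int))).keys
      = a.map Prod.fst := by
    simp [PySem.Dict.keys, hAitems, List.map_map, Function.comp]
  rw [pvSetdefaultFold_items b _ hb, hAitems, hAkeys, pvKeyList, List.map_append]

theorem pvSeed_getD (a b : List (String × List (String × Int)))
    (ha : (a.map Prod.fst).Nodup) (hb : (b.map Prod.fst).Nodup) (k : String) :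
    (b.foldl (fun out p => out.setdefault p.1 PySem.Dict.empty)
      (a.foldl (fun out p => out.insert p.1 PySem.Dict.empty)
        (PySem.Dict.empty : PySem.Dict String (PySem.Dict String Int)))).getD k PySem.Dict.empty
      = PySem.Dict.empty := by
  set d := b.foldl (fun out p => out.setdefault p.1 PySem.Dict.empty)
      (a.foldl (fun out p => out.insert p.1 PySem.Dict.empty)
        (PySem.Dict.empty : PySem.Dict String (PySem.Dict String Int))) with hd
  have hitems := pvSeed_items a b ha hb
  rw [← hd] at hitems
  have hkeys : d.keys = pvKeyList a b := by
    have hid : List.map ((fun x : String × PySem.Dict String Int => x.1)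
          ∘ (fun k => (k, (PySem.Dict.empty : PySem.Dict String Int)))) (pvKeyList a b)
        = List.map id (pvKeyList a b) := List.map_congr_left (fun x _ => rfl)
    rw [PySem.Dict.keys, hitems, List.map_map, hid, List.map_id]
  by_cases hk : k ∈ pvKeyList a b
  · exact PySem.Dict.getD_of_mem_items d (by rw [hitems]; exact List.mem_map_of_mem hk)
      (by rw [hkeys]; exact pvKeyList_nodup ha hb) _
  · apply PySem.Dict.getD_of_not_contains
    rw [PySem.Dict.contains_eq_decide_mem_keys, hkeys]
    simp [hk]

-- the per-key slice of the flat counter regroups to the canonical per-key merge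
theorem pvSlice (a b : List (String × List (String × Int)))
    (hpre : Pre_union_sum_tables_py a b) (k : String) :
    (((pvTa a).map (fun p => (p.1, p.2 + (List.lookup p.1 (pvTa b)).getD 0))
        ++ (pvTa b).filter (fun q => !(((pvTa a).map Prod.fst).contains q.1))).filter
          (fun q => q.1.1 == k)).foldl (fun dd q => dd.insert q.1.2 q.2) PySem.Dict.empty
      = pvF a b k := by
  obtain ⟨ha, hb, hia, hib⟩ := hpre
  set av := (List.lookup k a).getD [] with hav
  set bv := (List.lookup k b).getD [] with hbv
  have hnav : (av.map Prod.fst).Nodup := pvRow_nodup hia k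
  have hnbv : (bv.map Prod.fst).Nodup := pvRow_nodup hib k
  -- the a-segment of the slice
  have hA : ((pvTa a).map (fun p => (p.1, p.2 + (List.lookup p.1 (pvTa b)).getD 0))).filter
      (fun q => q.1.1 == k)
      = av.map (fun q => ((k, q.1), q.2 + (List.lookup q.1 bv).getD 0)) := by
    rw [List.filter_map]
    have hpred : ((fun q : (String × String) × Int => q.1.1 == k)
        ∘ (fun p : (String × String) × Int => (p.1, p.2 + (List.lookup p.1 (pvTa b)).getD 0)))
        = (fun q => q.1.1 == k) := rfl
    rw [hpred, pvTa_filter a k ha, ← hav, List.map_map]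
    apply List.map_congr_left
    intro q _
    simp only [Function.comp]
    rw [pvTa_lookup b k q.1 hb, ← hbv]
  -- the b-segment of the slice
  have hB : ((pvTa b).filter (fun q => !(((pvTa a).map Prod.fst).contains q.1))).filter
      (fun q => q.1.1 == k)
      = (bv.filter (fun q => !((av.map Prod.fst).contains q.1))).map (fun q => ((k, q.1), q.2)) := by
    rw [List.filter_comm, pvTa_filter b k hb, ← hbv, List.filter_map]
    congr 1
    apply List.filter_congr
    intro q _
    simp only [Function.comp]
    have h1 : (((pvTa a).map Prod.fst).contains (k, q.1)) = ((av.map Prod.fst).contains q.1) := by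
      by_cases hm : q.1 ∈ av.map Prod.fst
      · simp [hm, (pvTa_mem_keys a k q.1 ha).2 hm]
      · have hm2 : (k, q.1) ∉ (pvTa a).map Prod.fst := fun h => hm ((pvTa_mem_keys a k q.1 ha).1 h)
        simp [hm, hm2]
    rw [h1]
  rw [List.filter_append, hA, hB]
  -- fold the slice (all fresh, distinct inner keys) and compare item lists
  set A' := av.map (fun q => ((k, q.1), q.2 + (List.lookup q.1 bv).getD 0)) with hA'
  set B' := (bv.filter (fun q => !((av.map Prod.fst).contains q.1))).map (fun q => ((k, q.1), q.2)) with hB'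
  have e1 : A'.map (fun q => q.1.2) = av.map Prod.fst := by
    rw [hA', List.map_map]; rfl
  have e2 : B'.map (fun q => q.1.2) = (bv.filter (fun q => !((av.map Prod.fst).contains q.1))).map Prod.fst := by
    rw [hB', List.map_map]; rfl
  have hdisj : ∀ x ∈ av.map Prod.fst, x ∉ (bv.filter (fun q => !((av.map Prod.fst).contains q.1))).map Prod.fst := by
    intro x hx1 hx2
    obtain ⟨q, hq, rfl⟩ := List.mem_map.1 hx2
    have h2 := (List.mem_filter.1 hq).2
    have h3 : q.1 ∉ av.map Prod.fst := by simpa [List.elem_iff] using h2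
    exact h3 hx1
  have hkeysnd : (((A' ++ B').map (fun q => q.1.2)).Nodup) := by
    rw [List.map_append, e1, e2]
    refine List.Nodup.append hnav (hnbv.sublist (List.filter_sublist.map Prod.fst)) hdisj
  apply PySem.Dict.ext
  have hL := PySem.Dict.items_foldl_insert_fresh (A' ++ B') (fun q => q.1.2) Prod.snd
    PySem.Dict.empty (fun q _ => PySem.Dict.contains_empty q.1.2) hkeysnd
  have h0 : (PySem.Dict.empty : PySem.Dict String Int).items = [] := rfl
  rw [hL]
  -- the right-hand side: pvMergeInner's items
  have hm : pvF a b k = pvSumFold bv (pvInsFold av PySem.Dict.empty) := by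
    rw [pvF, ← hav, ← hbv]; rfl
  have hmitems : (pvInsFold av PySem.Dict.empty).items = av := by
    have := pvInsFold_items av PySem.Dict.empty hnav (fun q _ => PySem.Dict.contains_empty q.1)
    simpa using this
  have hmkeys : (pvInsFold av PySem.Dict.empty).keys = av.map Prod.fst := by
    simp [PySem.Dict.keys, hmitems]
  have hmnd : (pvInsFold av PySem.Dict.empty).keys.Nodup := by rw [hmkeys]; exact hnav
  have hmcont : ∀ x, (pvInsFold av PySem.Dict.empty).contains x = (av.map Prod.fst).contains x := by
    intro x
    rw [PySem.Dict.contains_eq_decide_mem_keys, hmkeys]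
    simp
  rw [hm, pvSumFold_items bv _ hmnd hnbv, hmitems]
  rw [h0, List.nil_append, List.map_append]
  congr 1
  · rw [hA', List.map_map]
    rfl
  · rw [hB', List.map_map]
    have hid : ∀ (l : List (String × Int)),
        List.map ((fun a : (String × String) × Int => ((fun q : (String × String) × Int => q.1.2) a, a.2))
          ∘ (fun q : String × Int => ((k, q.1), q.2))) l = l :=
      fun l => (List.map_congr_left (fun x _ => rfl)).trans (List.map_id _)
    rw [hid]
    apply List.filter_congr
    intro q _
    rw [hmcont q.1]

-- ===================================================================

theorem pvB_canon (a b : List (String × List (String × Int)))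
    (hpre : Pre_union_sum_tables_py a b) :
    union_sum_tables_py_alt a b = pvCanon a b := by
  obtain ⟨ha, hb, hia, hib⟩ := hpre
  unfold union_sum_tables_py_alt
  dsimp only
  rw [List.foldl_cons, List.foldl_cons, List.foldl_nil, pvTableFold, pvTableFold]
  set seeded := b.foldl (fun out p => out.setdefault p.1 PySem.Dict.empty)
      (a.foldl (fun out p => out.insert p.1 PySem.Dict.empty)
        (PySem.Dict.empty : PySem.Dict String (PySem.Dict String Int))) with hseed
  set flat := pvSumFold (pvTa b) (pvSumFold (pvTa a) PySem.Dict.empty) with hflat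
  set final := flat.items.foldl (fun out q =>
      out.modify q.1.1 PySem.Dict.empty (fun dd => dd.insert q.1.2 q.2)) seeded with hfinal
  have hseeditems := pvSeed_items a b ha hb
  rw [← hseed] at hseeditems
  have hseedkeys : seeded.keys = pvKeyList a b := by
    have hid : List.map ((fun x : String × PySem.Dict String Int => x.1)
          ∘ (fun k => (k, (PySem.Dict.empty : PySem.Dict String Int)))) (pvKeyList a b)
        = List.map id (pvKeyList a b) := List.map_congr_left (fun x _ => rfl)
    rw [PySem.Dict.keys, hseeditems, List.map_map, hid, List.map_id]
  -- every flat key's first component is already a key of the seeded dict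
  have hflatkeys : ∀ q ∈ flat.items, q.1.1 ∈ pvKeyList a b := by
    intro q hq
    have h1 : q.1 ∈ flat.keys := PySem.Dict.mem_keys_of_mem_items flat hq
    have hk1 : (pvSumFold (pvTa a) (PySem.Dict.empty : PySem.Dict (String × String) Int)).keys
        = PySem.Set.update (PySem.Dict.empty : PySem.Dict (String × String) Int).keys
            ((pvTa a).map Prod.fst) :=
      PySem.Dict.keys_foldl_insert_key (pvTa a) Prod.fst (fun d x => d.getD x.1 0 + x.2) _
    have hk2 : flat.keys
        = PySem.Set.update (pvSumFold (pvTa a) (PySem.Dict.empty : PySem.Dict (String × String) Int)).keys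
            ((pvTa b).map Prod.fst) :=
      PySem.Dict.keys_foldl_insert_key (pvTa b) Prod.fst (fun d x => d.getD x.1 0 + x.2) _
    have h2 : flat.keys = PySem.Set.update (PySem.Set.update
        (PySem.Dict.empty : PySem.Dict (String × String) Int).keys ((pvTa a).map Prod.fst))
        ((pvTa b).map Prod.fst) :=
      hk2.trans (congrArg (fun s => PySem.Set.update s ((pvTa b).map Prod.fst)) hk1)
    rw [h2] at h1
    rw [PySem.Set.mem_update, PySem.Set.mem_update] at h1
    rcases h1 with (h1 | h1) | h1
    · simp [PySem.Dict.keys_empty] at h1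
    · exact (pvKeyList_mem a b q.1.1).2 (Or.inl (pvTa_keys_fst h1))
    · exact (pvKeyList_mem a b q.1.1).2 (Or.inr (pvTa_keys_fst h1))
  have hfinkeys : final.keys = pvKeyList a b := by
    have h3 : final.keys = PySem.Set.update seeded.keys (flat.items.map (fun q => q.1.1)) :=
      PySem.Dict.keys_foldl_modify_key flat.items (fun q => q.1.1) PySem.Dict.empty
        (fun _ q => fun dd => dd.insert q.1.2 q.2) seeded
    rw [h3, hseedkeys, PySem.Set.update_eq_append_filter]
    have hnil : (PySem.Set.ofList (flat.items.map (fun q => q.1.1))).filter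
        (fun y => !(PySem.Set.contains (pvKeyList a b) y)) = [] := by
      rw [List.filter_eq_nil_iff]
      intro x hx
      have hx' : x ∈ flat.items.map (fun q => q.1.1) := (PySem.Set.mem_ofList _ _).1 hx
      obtain ⟨q, hq, rfl⟩ := List.mem_map.1 hx'
      have := hflatkeys q hq
      simp [PySem.Set.contains, this]
    rw [hnil, List.append_nil]
  have hfinnd : final.keys.Nodup := by
    rw [hfinkeys]; exact pvKeyList_nodup ha hb
  rw [PySem.Dict.items_eq_map_keys final hfinnd PySem.Dict.empty, hfinkeys, List.map_map]
  unfold pvCanon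
  apply List.map_congr_left
  intro k _
  simp only [Function.comp]
  have hval : final.getD k PySem.Dict.empty = pvF a b k := by
    rw [hfinal, pvModifyFold_getD, pvSeed_getD a b ha hb k, hflat,
      pvFlat_items a b ⟨ha, hb, hia, hib⟩]
    exact pvSlice a b ⟨ha, hb, hia, hib⟩ k
  rw [hval]

-- ===== VERDICT (by name: the statement is the Claim_ definition above) =====
theorem union_sum_tables_py_spec : Claim_equal_union_sum_tables_py := by
  intro a b _ hpre
  show union_sum_tables_py a b = union_sum_tables_py_alt a b
  rw [pvA_canon a b hpre, pvB_canon a b hpre]
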